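/- GENERATED by mk_final_copies.py from the proof of the farm's unit `start_decoder.R7a` (farm:start_decoder.R7a.1: Lemmas.lean) as the
   re-elaboration sweep compiled it — do not edit. -/
/-
  LEMMAS of unit `start_decoder.R7a` (0x115db9 – 0x115e37: the test of loop 4079 and the call `setup_malloc(f, classwords)`).
  The logic of the segment; the machine walk is in Proof.lean.

      QuietWin, Quiet           what the segment and its callee write: the stack below `[R + 8]`, the spill `[R + 30H, R + 38H)`, the
                                allocator's two fields of `*f`, shadow bytes — and what that keeps (every arena block, the windows of
                                `*f` that RES(i) reads, the dword `[R + 38H]`)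
      rec_in, cb_in             record `i` / its class book lie inside a live block of the arena (the five check sites)
      Loads                     the five loaded values as numbers, with their ranges (K1, R7)
      exit_head                 the exit `AtR2 (i + 1)` (`E ≤ j`)
      exit_row                  the exit `AtR7Row` at the return of `setup_malloc`
      the bit-level facts of the walk (`zx8`, `cmp_jg`, `lea8`, …)
-/
import Asan.CheckWalk
import Vorbis.Spec.Reader
import Vorbis.Spec.Units.start_decoder_R7a

open X86 X86.User Asan Vorbis Vorbis.Spec Vorbis.Spec.StartDecoder

set_option maxRecDepth 4000
set_option maxHeartbeats 4000000

namespace Vorbis.Spec.start_decoder_R7a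

/-! ### What the segment writes, and what that keeps -/

/-- **A window of the segment's footprint**: the stack below `[R + 8]` (the pushed return addresses, `setup_malloc`'s frame), the
spill slot `[R + 30H, R + 38H)` (`&r->classdata`), `setup_memory_required` and `setup_offset` of `*f` (the allocator), or shadow
bytes (the allocator's unpoisoning of the new block). -/
def QuietWin (g : Ghost) (x : Span) : Prop :=
  (g.R - 408 ≤ x.lo ∧ x.hi ≤ g.R + 8) ∨ (g.R + 0x30 ≤ x.lo ∧ x.hi ≤ g.R + 0x38) ∨
  (g.f + 8 ≤ x.lo ∧ x.hi ≤ g.f + 12) ∨ (g.f + 128 ≤ x.lo ∧ x.hi ≤ g.f + 132) ∨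
  (0xC00000 ≤ x.lo ∧ x.hi ≤ 0xE00000)

/-- **What a footprint of `QuietWin`s keeps**: every block of the arena, the windows of `*f` that RES(i + 1) reads, the dword
`[R + 38H]` (the spilled `i`). -/
structure Quiet (g : Ghost) (i : Nat) (A : Arena × List Obj) (m m' : Mem) : Prop where
  /-- every setup block of the arena is kept -/
  blocks : AllKept A.1.Blk m m'
  /-- `codebook_count`, `codebooks`, `residue_count`, `residue_types[0 .. i]`, `residue_config` read the same -/
  obj : ObjEq (Res.wins (i + 1)) m g.f m' g.f
  /-- the dword `[R + 38H]` reads the same -/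
  cnt : StartDecoder.slot g m' 0x38 = StartDecoder.slot g m 0x38

/-- A footprint of `QuietWin`s is `Quiet`. -/
theorem Quiet.of_sameExcept {g : Ghost} {i : Nat} {A : Arena × List Obj} {m m' : Mem} {f' : Nat} {ws : List Span}
    (hp : Pos g A) (ha : ArenaOK A.1 A.2 m f') (hi : i < 64) (hs : Mem.SameExcept ws m m')
    (hok : ∀ x, x ∈ ws → QuietWin g x) : Quiet g i A m m' := by
  have p1 := hp.r_eq
  have p2 := hp.ra_lo
  have p3 := hp.ra_hi
  have p4 := hp.objOut
  have p5 := hp.ar_stack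
  have p6 := hp.ar_hi
  have p7 := hp.f_stack
  have p8 := hp.f_hi
  refine ⟨?_, ?_, ?_⟩
  · apply allKept_off_arena ha hs
    intro x hx
    have q := hok x hx
    unfold QuietWin at q
    omega
  · apply ObjEq.of_sameExcept hs
    · intro x hx
      simp only [Res.wins, List.mem_cons, List.mem_nil_iff, or_false] at hx
      rcases hx with rfl | rfl | rfl
      all_goals simp only []
      all_goals omega
    · intro x hx y hy
      have q := hok y hy
      unfold QuietWin at q
      simp only [Res.wins, List.mem_cons, List.mem_nil_iff, or_false] at hx
      rcases hx with rfl | rfl | rfl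
      all_goals simp only []
      all_goals omega
  · have e38 : Mem.EqOn (g.R + 0x38) (g.R + 0x3c) m m' := by
      apply hs.eqOn
      intro x hx
      have q := hok x hx
      unfold QuietWin at q
      omega
    unfold StartDecoder.slot
    exact (e38.u32 (g.R + 0x38) (by omega) (by omega) (by omega))

/-! ### The memory-level content of the entry assertion over a quiet footprint -/

/-- **What the entry assertion `BodyR7J` says about the memory, for a later memory `m'`**: the reads of record `i`, RES(i) with its
ages, `classdata = NULL` from record `i + 1` on, the record under construction, the ghost `E`, the finished rows, the spilled `i`. -/
structure Carry (g : Ghost) (i j E : Nat) (A6 A6c Ai Ak Ad : Arena) (A : Arena × List Obj) (m m' : Mem) : Prop where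
  /-- the fields of record `i` and of its class book read the same -/
  reads : ResidueReads m g.f m' g.f (resAt g m i)
  /-- the record has not moved -/
  rat : resAt g m' i = resAt g m i
  /-- `residue_count` reads the same -/
  count : stb_vorbis.residue_count m' g.f = stb_vorbis.residue_count m g.f
  /-- RES(i) -/
  res : ResTrans A6 A6c Ai A.1 m' g.f i
  /-- `classdata = NULL` from record `i + 1` on -/
  zero : ResidueZeroFrom m' g.f (i + 1)
  /-- record `i` up to R8a's first half -/
  cur : ResCur g (Since Ai Ak) (Since Ak Ad) m' i 7
  /-- the ghost `E` -/
  e_eq : Residue.E m' g.f (resAt g m' i) = E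
  /-- the finished rows -/
  rows : RowsUpTo (Since Ad A.1) m' g.f (resAt g m' i) j
  /-- dword `[R + 38H]` = i -/
  cnt : StartDecoder.slot g m' 0x38 = i

/-- **The entry assertion's memory-level content over a `Quiet` change of the memory** (no arena block is written, the windows of
`*f` that RES(i + 1) reads are not written): `ResTrans.carry_obj`, `Res.zero_carry`, `ResCur.carry_obj`, `RowsUpTo.frame` with
`Kept` facts that all come from `AllKept A.1.Blk`. -/
theorem Carry.of_quiet {u₀ : State} {g : Ghost} {i j E : Nat} {A6 A6c Ai Ak Ad : Arena} {A : Arena × List Obj} {v : State}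
    {m' : Mem} (hb : BodyR7J u₀ g i j E A6 A6c Ai Ak Ad A v) (hq : Quiet g i A v.mem m') :
    Carry g i j E A6 A6c Ai Ak Ad A v.mem m' := by
  have hloop := hb.loop
  have hres := hloop.res
  have hcur := hb.cur
  have hlt := hcur.lt
  have h1 := hres.R1
  have h64 : i < 64 := by omega
  have hk := hq.blocks
  have he := hq.obj
  have he0 : ObjEq (Res.wins i) v.mem g.f m' g.f := by
    apply he.sub
    intro x hx
    simp only [Res.wins, List.mem_cons, List.mem_nil_iff, or_false] at hx
    rcases hx with rfl | rfl | rfl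
    · exact ⟨(160, 176), List.mem_cons_self, Nat.le_refl _, Nat.le_refl _⟩
    · refine ⟨(320, 324 + 2 * (i + 1)), List.mem_cons_of_mem _ List.mem_cons_self, Nat.le_refl _, ?_⟩
      simp only []
      omega
    · exact ⟨(456, 464), List.mem_cons_of_mem _ (List.mem_cons_of_mem _ List.mem_cons_self), Nat.le_refl _, Nat.le_refl _⟩
  have he' : ObjEq ResidueAtOK.wins v.mem g.f m' g.f := by
    apply he.sub
    intro x hx
    simp only [ResidueAtOK.wins, List.mem_cons, List.mem_nil_iff, or_false] at hx
    subst hx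
    exact ⟨(160, 176), List.mem_cons_self, Nat.le_refl _, Nat.le_refl _⟩
  -- the blocks the assertion names are blocks of the current arena
  have hAiA : Ai.Extends A.1 := (hb.extk.trans hb.extd).trans hb.extd'
  have hconfK := hk _ ((hres.R2.1.mono hres.ext6c).mono hres.exti)
  have hrecK : (Block.mk (resAt g v.mem i) Off.sizeof.Residue).Kept v.mem m' := by
    apply hconfK.mono
    · simp only [resAt, vacc, voff]
      omega
    · simp only [resAt, vacc, voff] at h1 hlt ⊢
      omega
  have hcbK : (codebooksBlock v.mem g.f).Kept v.mem m' :=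
    hk _ (((((hloop.mid.own.cb0 (by omega)).ok (hloop.mid.own.nonnull (by omega))).F2.mono hres.ext6).mono
      hres.ext6c).mono hres.exti)
  have h7 := hcur.R7
  have hcbkK : (Block.mk (Residue.cbk v.mem g.f (resAt g v.mem i)) 8).Kept v.mem m' := by
    apply hcbK.mono
    · simp only [vacc, voff]
      omega
    · simp only [vacc, voff] at h7 ⊢
      omega
  have hbooksK := hk _ (((hcur.R8 (by omega)).1.mono hb.extd).mono hb.extd')
  have hcdK := hk _ ((hcur.R8a (by omega)).1.mono hb.extd')
  have hrd := ResidueReads.of_kept he' hrecK hcbkK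
  have er := Res.resAt_same he i
  have hptr : ∀ q : Nat, q < j →
      Residue.row m' (resAt g v.mem i) q = Residue.row v.mem (resAt g v.mem i) q := by
    intro q hq'
    have hjE := hb.j_le
    have hE := hb.e_eq
    exact Residue.row_kept hrd hcdK (by omega)
  exact
    { reads := hrd
      rat := er
      count := Res.count_same he
      res := by
        apply hres.carry_obj he0 ?_ hcbK ?_
        · intro i' hi'
          apply hconfK.mono
          · simp only [vacc, voff]
            omega
          · simp only [vacc, voff] at h1 hlt ⊢
            omega
        · intro B hB
          exact hk _ (hB.1.mono hres.exti)
      zero := by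
        apply Res.zero_carry hloop.zero he
        intro i' hi'
        apply hconfK.mono
        · simp only [vacc, voff]
          omega
        · simp only [vacc, voff] at h1 hi' ⊢
          omega
      cur := hcur.carry_obj he h64 hrecK hcbkK (fun _ => hbooksK) (fun _ hB => hB) (fun _ hB => hB)
      e_eq := by
        rw [er, hrd.E]
        exact hb.e_eq
      rows := by
        rw [er]
        apply hb.rows.frame hrd hptr
        intro q hq'
        exact ⟨hb.rows.rows q hq', hk _ (hb.rows.rows q hq').1⟩
      cnt := by
        rw [hq.cnt]
        exact hb.cnt }

/-! ### The two exits -/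

/-- K1 of the class book of record `i`: `1 ≤ classwords ≤ 65535`, `entries < 2^24` (through `Mid.own.books` and R7). -/
theorem classbook_k1 {u₀ : State} {g : Ghost} {i j E : Nat} {A6 A6c Ai Ak Ad : Arena} {A : Arena × List Obj} {v : State}
    (hb : BodyR7J u₀ g i j E A6 A6c Ai Ak Ad A v) :
    Codebook.K1 v.mem (Residue.cbk v.mem g.f (resAt g v.mem i)) :=
  (hb.loop.mid.own.books (by omega) _ hb.cur.R7).K1

/-- **THE EXIT `AtR2 (i + 1)`** (0x115df4 – 0x115dfd, `E ≤ j`: the rows are complete): the loop's invariant over the pushed return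
addresses of the three check sites (`ResLoop.carry`), the record assembled (`R7.exit_trans`) and carried (`ResTrans.carry_obj`),
`r14d = i + 1`. -/
theorem exit_head {u₀ : State} {g : Ghost} {i j E : Nat} {A6 A6c Ai Ak Ad : Arena} {A : Arena × List Obj} {v w : State}
    {ws : List Span} (hb : BodyR7J u₀ g i j E A6 A6c Ai Ak Ad A v) (hj : E ≤ j)
    (hs : Mem.SameExcept ws v.mem w.mem) (hun : ShadowUntouched v.mem w.mem)
    (hok : ∀ x, x ∈ ws → g.R - 408 ≤ x.lo ∧ x.hi ≤ g.R + 8)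
    (hrip : w.rip = L.start_decoder.cut235) (hrsp : w.reg .rsp = addr g.R) (hcode : CodeOK u₀ w.mem) (hinv : abiInv w)
    (hrbp : w.reg .rbp = v.reg .rbp) (hr14 : w.reg .r14 = addr (i + 1)) : AtR2 u₀ g (i + 1) w := by
  have hloop := hb.loop
  have hm := hloop.mid
  have hres := hloop.res
  have hlt := hb.cur.lt
  have h1 := hres.R1
  have hp : Pos g A := Pos.of_mid hloop.frame hloop.hand hm
  have hbits : Bits (g.Blk A) g.len w.mem g.f := by
    apply bits_kept hp hm.bits hs
    intro x hx
    have q := hok x hx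
    left
    omega
  have hloopw : ResLoop u₀ g L.start_decoder.cut235 i (i + 1) A6 A6c Ai A w := by
    apply hloop.carry hlt hs hun ?_ hbits hrip hrsp hcode hinv
    intro x hx
    exact Or.inl (hok x hx)
  have hq : Quiet g i A v.mem w.mem := by
    apply Quiet.of_sameExcept hp hm.arena (by omega) hs
    intro x hx
    exact Or.inl (hok x hx)
  have hk1 := classbook_k1 hb
  have hW : 1 ≤ Residue.W v.mem g.f (resAt g v.mem i) := by
    have hd := hk1.dim_pos
    unfold Residue.W
    omega
  have hres1 := R7.exit_trans hb hj hW
  have hconfK := hq.blocks _ ((hres.R2.1.mono hres.ext6c).mono hres.exti)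
  have hres1w : ResTrans A6 A6c A.1 A.1 w.mem g.f (i + 1) := by
    apply hres1.carry_obj hq.obj
    · intro i' hi'
      apply hconfK.mono
      · simp only [vacc, voff]
        omega
      · simp only [vacc, voff] at h1 hlt ⊢
        omega
    · exact hq.blocks _ (((((hm.own.cb0 (by omega)).ok (hm.own.nonnull (by omega))).F2.mono hres.ext6).mono
        hres.ext6c).mono hres.exti)
    · intro B hB
      exact hq.blocks _ hB.1
  exact ⟨A6, A6c, A, ⟨⟨hloopw.frame, hloopw.hand, hloopw.mid, hres1w.n_le, hres1w, hloopw.zero⟩, hrbp.trans hb.rbp, hr14⟩⟩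

/-- **THE EXIT `AtR7Row`** (0x115e3c, the return of `setup_malloc(f, classwords)`, `j < E`): the point for the ghost after the call
(`hpt`: `SecPt.alloc_call` / `SecPt.alloc_fail_small`), the allocation's outcome (`hret`), and ONE footprint from the segment's entry
to the returned state whose windows are `QuietWin`s (the pushes, the spill `[R + 30H]`, the allocator's footprint): everything the
entry assertion says about the memory is carried by `Carry.of_quiet`. -/
theorem exit_row {u₀ : State} {g : Ghost} {i j E : Nat} {A6 A6c Ai Ak Ad : Arena} {A A' : Arena × List Obj} {v sr : State}
    {ws : List Span} (hb : BodyR7J u₀ g i j E A6 A6c Ai Ak Ad A v) (hjE : j < E)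
    (hpt : SecPt u₀ g L.start_decoder.cut266 6 6 7 A6 A' sr)
    (hret : AllocRet A A' (Residue.W v.mem g.f (resAt g v.mem i)) sr)
    (hs : Mem.SameExcept ws v.mem sr.mem) (hok : ∀ x, x ∈ ws → QuietWin g x)
    (hrbx : sr.reg .rbx = v.reg .rbx) (hr13 : sr.reg .r13 = v.reg .r13) (hr14 : sr.reg .r14 = addr (8 * j))
    (hr12 : sr.reg .r12 = addr (Residue.classdata v.mem (resAt g v.mem i) + 8 * j))
    (hr15 : sr.reg .r15 = addr (Residue.W v.mem g.f (resAt g v.mem i)))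
    (h30 : sr.mem.u64 (g.R + 0x30) = resAt g v.mem i + 0x10) : AtR7Row u₀ g i j E sr := by
  have hloop := hb.loop
  have hm := hloop.mid
  have h1 := hloop.res.R1
  have hlt := hb.cur.lt
  have hp : Pos g A := Pos.of_mid hloop.frame hloop.hand hm
  have hq : Quiet g i A v.mem sr.mem := Quiet.of_sameExcept hp hm.arena (by omega) hs hok
  have c := Carry.of_quiet hb hq
  have hres' : ResTrans A6 A6c Ai A'.1 sr.mem g.f i :=
    ⟨c.res.ext6, c.res.ext6c, c.res.exti.trans hret.ext, c.res.n_le, c.res.R1, c.res.R2, c.res.R3, c.res.record⟩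
  refine ⟨A6, A6c, Ai, Ak, Ad, A, A', ?_⟩
  exact
    { loop := ⟨hpt.frame, hpt.hand, hpt.mid, hres'.n_le, hres', c.zero⟩
      alloc := by
        rw [c.rat, c.reads.W]
        exact hret
      extk := hb.extk
      extd := hb.extd
      extd' := hb.extd'
      rbp := hpt.rbp
      rbx := by
        rw [c.rat]
        exact hrbx.trans hb.rbx
      r13 := hr13.trans hb.r13
      cnt := c.cnt
      cur := c.cur
      e_eq := c.e_eq
      j_lt := hjE
      rows := c.rows
      r14 := hr14
      r12 := by
        rw [c.rat, c.reads.classdata]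
        exact hr12
      r15 := by
        rw [c.rat, c.reads.W]
        exact hr15
      slot30 := by
        rw [c.rat]
        exact h30 }

/-! ### The values the segment loads -/

/-- The load at 0x115dc5: `f->codebooks`. -/
theorem load_codebooks (mem : Mem) (f : Nat) : mem.readLE (addr f + 168) 8 = stb_vorbis.codebooks mem f := by
  simp only [vfield, vacc, voff]

/-- The load at 0x115dd5: `r->classbook`. -/
theorem load_classbook (mem : Mem) (r : Nat) : mem.readLE (addr r + 13) 1 = Residue.classbook mem r := by
  simp only [vfield, vacc, voff]

/-- The load at 0x115e2d: `r->classdata`. -/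
theorem load_classdata (mem : Mem) (r : Nat) : mem.readLE (addr r + 16) 8 = Residue.classdata mem r := by
  simp only [vfield, vacc, voff]

/-- The class book's address: `codebooks + 2120 · classbook`, the class book number a byte. -/
theorem cbk_eq (mem : Mem) (f r : Nat) :
    Residue.cbk mem f r = stb_vorbis.codebooks mem f + 2120 * Residue.classbook mem r ∧ Residue.classbook mem r < 256 := by
  refine ⟨?_, ?_⟩
  · simp only [vacc, voff]
  · simp only [vacc, voff]
    exact Mem.u8_lt _ _

/-- The load at 0x115ded: `cb.entries` is the ghost `E` (K1: `0 ≤ entries < 2^24`). -/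
theorem load_entries {u₀ : State} {g : Ghost} {i j E : Nat} {A6 A6c Ai Ak Ad : Arena} {A : Arena × List Obj} {v : State}
    (hb : BodyR7J u₀ g i j E A6 A6c Ai Ak Ad A v) :
    v.mem.readLE (addr (Residue.cbk v.mem g.f (resAt g v.mem i)) + 4) 4 = E ∧ E < 2 ^ 24 := by
  have hk1 := classbook_k1 hb
  have h0 := hk1.ent_nonneg
  have h1 := hk1.ent_lt
  have he := hb.e_eq
  unfold Residue.E at he
  simp only [Codebook.entries, voff] at h0 h1 he
  have hc := v.mem.i32_cases (Residue.cbk v.mem g.f (resAt g v.mem i) + 4)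
  have e : v.mem.readLE (addr (Residue.cbk v.mem g.f (resAt g v.mem i)) + 4) 4 =
      v.mem.u32 (Residue.cbk v.mem g.f (resAt g v.mem i) + 4) := by
    simp only [vfield]
  rw [e]
  omega

/-- The load at 0x115e0a: `cb.dimensions` is `classwords` (K1: `1 ≤ dimensions ≤ 65535`). -/
theorem load_dims {u₀ : State} {g : Ghost} {i j E : Nat} {A6 A6c Ai Ak Ad : Arena} {A : Arena × List Obj} {v : State}
    (hb : BodyR7J u₀ g i j E A6 A6c Ai Ak Ad A v) :
    v.mem.readLE (addr (Residue.cbk v.mem g.f (resAt g v.mem i))) 4 = Residue.W v.mem g.f (resAt g v.mem i) ∧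
      1 ≤ Residue.W v.mem g.f (resAt g v.mem i) ∧ Residue.W v.mem g.f (resAt g v.mem i) ≤ 65535 := by
  have hk1 := classbook_k1 hb
  have h0 := hk1.dim_pos
  have h1 := hk1.dim_le
  unfold Residue.W
  simp only [Codebook.dimensions, voff] at h0 h1 ⊢
  have hc := v.mem.i32_cases (Residue.cbk v.mem g.f (resAt g v.mem i) + 0)
  have e : v.mem.readLE (addr (Residue.cbk v.mem g.f (resAt g v.mem i))) 4 =
      v.mem.u32 (Residue.cbk v.mem g.f (resAt g v.mem i) + 0) := by
    rw [Nat.add_zero]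
    rfl
  rw [e]
  omega

/-! ### Where record `i` and its class book are; the check sites -/

/-- The block `residue_config` is a block of the current arena, and record `i` lies inside it. -/
theorem rec_in {u₀ : State} {g : Ghost} {i j E : Nat} {A6 A6c Ai Ak Ad : Arena} {A : Arena × List Obj} {v : State}
    (hb : BodyR7J u₀ g i j E A6 A6c Ai Ak Ad A v) :
    A.1.Blk ⟨stb_vorbis.residue_config v.mem g.f, Off.sizeof.Residue * (stb_vorbis.residue_count v.mem g.f).toNat⟩ ∧
      stb_vorbis.residue_config v.mem g.f ≤ resAt g v.mem i ∧
      resAt g v.mem i + 32 ≤ stb_vorbis.residue_config v.mem g.f +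
        Off.sizeof.Residue * (stb_vorbis.residue_count v.mem g.f).toNat := by
  have hres := hb.loop.res
  have h1 := hres.R1
  have hlt := hb.cur.lt
  refine ⟨(hres.R2.1.mono hres.ext6c).mono hres.exti, ?_, ?_⟩
  · simp only [resAt, vacc, voff]
    omega
  · simp only [resAt, vacc, voff] at h1 hlt ⊢
    omega

/-- The codebooks block is a block of the current arena, and the class book of record `i` lies inside it. -/
theorem cb_in {u₀ : State} {g : Ghost} {i j E : Nat} {A6 A6c Ai Ak Ad : Arena} {A : Arena × List Obj} {v : State}
    (hb : BodyR7J u₀ g i j E A6 A6c Ai Ak Ad A v) :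
    A.1.Blk (codebooksBlock v.mem g.f) ∧
      (codebooksBlock v.mem g.f).contains (Residue.cbk v.mem g.f (resAt g v.mem i)) Off.sizeof.Codebook := by
  have hres := hb.loop.res
  have hm := hb.loop.mid
  have hok := (hm.own.cb0 (by omega)).ok (hm.own.nonnull (by omega))
  exact ⟨((hok.F2.mono hres.ext6).mono hres.ext6c).mono hres.exti, hok.cb_in _ hb.cur.R7⟩

/-- **Where record `i` and its class book are**, as arithmetic for the walker: inside the arena's buffer. -/
theorem where_ {u₀ : State} {g : Ghost} {i j E : Nat} {A6 A6c Ai Ak Ad : Arena} {A : Arena × List Obj} {v : State}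
    (hb : BodyR7J u₀ g i j E A6 A6c Ai Ak Ad A v) :
    (A.1.B ≤ resAt g v.mem i ∧ resAt g v.mem i + 32 ≤ A.1.B + A.1.L) ∧
      (A.1.B ≤ Residue.cbk v.mem g.f (resAt g v.mem i) ∧
        Residue.cbk v.mem g.f (resAt g v.mem i) + 2120 ≤ A.1.B + A.1.L) := by
  have harena := hb.loop.mid.arena
  obtain ⟨hB, h1, h2⟩ := rec_in hb
  obtain ⟨hC, h3⟩ := cb_in hb
  have hin := arena_inside harena hB
  have hin' := arena_inside harena hC
  simp only [vblock, voff] at hin hin' h3 h2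
  omega

/-- **A check site inside record `i`** (`r + 13` load1, `r + 16` load8): the record lies inside the live block `residue_config`. -/
theorem check_rec {u₀ : State} {g : Ghost} {i j E : Nat} {A6 A6c Ai Ak Ad : Arena} {A : Arena × List Obj} {v : State}
    (hb : BodyR7J u₀ g i j E A6 A6c Ai Ak Ad A v) {mem' : Mem} (hun : ShadowUntouched v.mem mem') (b : Word) (off k : Nat)
    (hbn : b.toNat = resAt g v.mem i + off) (hk : 1 ≤ k) (hoff : off + k ≤ 32) : AccSmall k mem' b := by
  obtain ⟨hB, h1, h2⟩ := rec_in hb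
  have hl : LiveIn A.2 g.frames' _ _ := liveIn_of_arenaBlk hb.loop.mid.arena hB
  apply hl.accSmall hb.loop.frame.shadow hun b k hk
  · simp only []
    omega
  · simp only []
    omega

/-- **A check site inside the class book of record `i`** (`cb + 4` load4, `cb` load4): the struct lies inside the live codebooks
block. -/
theorem check_cb {u₀ : State} {g : Ghost} {i j E : Nat} {A6 A6c Ai Ak Ad : Arena} {A : Arena × List Obj} {v : State}
    (hb : BodyR7J u₀ g i j E A6 A6c Ai Ak Ad A v) {mem' : Mem} (hun : ShadowUntouched v.mem mem') (b : Word) (off k : Nat)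
    (hbn : b.toNat = Residue.cbk v.mem g.f (resAt g v.mem i) + off) (hk : 1 ≤ k) (hoff : off + k ≤ 2120) :
    AccSmall k mem' b := by
  obtain ⟨hC, h3⟩ := cb_in hb
  have hl : LiveIn A.2 g.frames' _ _ := liveIn_of_arenaBlk hb.loop.mid.arena hC
  simp only [vblock, voff] at h3
  apply hl.accSmall hb.loop.frame.shadow hun b k hk
  · simp only []
    omega
  · simp only [voff]
    omega

/-- **A check site inside `*f`** (`f + 168` load8). -/
theorem check_f {u₀ : State} {g : Ghost} {i j E : Nat} {A6 A6c Ai Ak Ad : Arena} {A : Arena × List Obj} {v : State}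
    (hb : BodyR7J u₀ g i j E A6 A6c Ai Ak Ad A v) {mem' : Mem} (hun : ShadowUntouched v.mem mem') (b : Word) (off k : Nat)
    (hbn : b.toNat = g.f + off) (hk : 1 ≤ k) (hoff : off + k ≤ 1808) : AccSmall k mem' b := by
  refine (hb.loop.hand.obj.mono (frames'_sub g A.2)).accSmall hb.loop.frame.shadow hun b k hk (by omega) ?_
  simp only [Off.sizeof.stb_vorbis]
  omega

/-! ### The bit-level facts of the walk -/

/-- `movzx eax, byte [m] ; imul rax, rax, 848H` on a byte `n`: the walker's form of the zero-extended byte is the number. -/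
theorem zx8 (n : Nat) (h : n < 256) :
    Word.ofBV (BitVec.setWidth 64 (BitVec.zeroExtend 32 (BitVec.ofNat 8 n))) = UInt64.ofNat n := by
  apply UInt64.toNat_inj.mp
  unfold Word.ofBV
  rw [UInt64.toNat_ofBitVec, BitVec.toNat_setWidth, BitVec.toNat_setWidth, BitVec.toNat_setWidth, BitVec.toNat_ofNat,
    UInt64.toNat_ofNat']
  omega

/-- `f->codebooks + 2120 · classbook` as the walker computes it (`mov r12, [f + 0a8H] ; imul rax, rax, 848H ; add r12, rax`). -/
theorem cb_word (cbs n cb : Nat) (h : cb = cbs + 2120 * n) (hlt : cb < 2 ^ 64) :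
    UInt64.ofNat cbs + UInt64.ofNat n * 2120 = addr cb := by
  apply UInt64.toNat_inj.mp
  have e : (2120 : UInt64).toNat = 2120 := rfl
  rw [UInt64.toNat_add, UInt64.toNat_mul, UInt64.toNat_ofNat', UInt64.toNat_ofNat', e, toNat_addr _ hlt, h]
  omega

/-- `lea r14, [rax*8]` with `rax = j`: `8 j` (no bound needed: both sides are taken modulo `2^64`). -/
theorem mul8_word (j : Nat) : UInt64.ofNat j * 8 = addr (8 * j) := by
  apply UInt64.toNat_inj.mp
  have e : (8 : UInt64).toNat = 8 := rfl
  unfold addr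
  rw [UInt64.toNat_mul, UInt64.toNat_ofNat', UInt64.toNat_ofNat', e]
  omega

/-- `&classdata[j]` as the walker computes it (`mov r12, r14 ; add r12, [rbx + 10H]`). -/
theorem elem8_word (j cd : Nat) : UInt64.ofNat j * 8 + UInt64.ofNat cd = addr (cd + 8 * j) := by
  apply UInt64.toNat_inj.mp
  have e : (8 : UInt64).toNat = 8 := rfl
  unfold addr
  rw [UInt64.toNat_add, UInt64.toNat_mul, UInt64.toNat_ofNat', UInt64.toNat_ofNat', UInt64.toNat_ofNat', e]
  omega

end Vorbis.Spec.start_decoder_R7a
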